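-- pv_equiv track=rewrite | github.com/tudragon154203/product-video-matching | infra/pvm/sync_compose.py | remove_gpu_deploy_blocks
-- ===== SOURCE A (Python) =====
-- def remove_gpu_deploy_blocks(lines):
--     """
--     Remove deploy->resources->reservations->devices blocks that request GPU.
--
--     This is used to produce a CPU-only compose for Mac native environments
--     that don't support NVIDIA GPUs under Docker Desktop.
--
--     Args:
--         lines (list[str]): Lines from the source compose file
--
--     Returns:
--         list[str]: Lines with GPU deploy blocks removed
--     """
--     result = []
--     i = 0
--     n = len(lines)
--
--     while i < n:
--         line = lines[i]
--         stripped = line.strip()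
--
--         # Drop stray GPU-hint comments
--         if stripped.startswith('#') and 'Uncomment for GPU support' in stripped:
--             i += 1
--             continue
--
--         if stripped.startswith('deploy:'):
--             deploy_indent = len(line) - len(line.lstrip())
--             block_lines = [line]
--             j = i + 1
--
--             # Collect the deploy block
--             while j < n:
--                 next_line = lines[j]
--                 next_stripped = next_line.strip()
--                 next_indent = len(next_line) - len(next_line.lstrip())
--
--                 # Stop when indentation decreases to deploy level and it's a non-comment, non-empty line
--                 if next_stripped and not next_stripped.startswith('#') and next_indent <= deploy_indent:
--                     break
--
--                 block_lines.append(next_line)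
--                 j += 1
--
--             block_text = ''.join(block_lines)
--             # If this deploy block references GPU capabilities, drop it
--             if 'capabilities' in block_text and 'gpu' in block_text:
--                 i = j
--                 continue
--             else:
--                 # Keep the deploy block as-is
--                 result.extend(block_lines)
--                 i = j
--                 continue
--
--         # Default: keep the line
--         result.append(line)
--         i += 1
--
--     return result
-- ===== SOURCE B (Python) =====
-- def remove_gpu_deploy_blocks(lines):
--     """Single flat pass with a state machine (outside / inside-deploy-block)."""
--     result = []
--     state = None  # None = outside; (deploy_indent, buffer) = inside a deploy block
--
--     def flush(buf):
--         text = ''.join(buf)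
--         if 'capabilities' in text and 'gpu' in text:
--             return  # drop GPU block
--         result.extend(buf)
--
--     def outside(line):
--         stripped = line.strip()
--         if stripped.startswith('#') and 'Uncomment for GPU support' in stripped:
--             return None
--         if stripped.startswith('deploy:'):
--             return (len(line) - len(line.lstrip()), [line])
--         result.append(line)
--         return None
--
--     for line in lines:
--         if state is None:
--             state = outside(line)
--         else:
--             indent0, buf = state
--             stripped = line.strip()
--             if stripped and not stripped.startswith('#') and len(line) - len(line.lstrip()) <= indent0:
--                 flush(buf)
--                 state = outside(line)
--             else:
--                 buf.append(line)
--     if state is not None: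
--         flush(state[1])
--     return result
-- ===== Notes on version B (the rewrite author's own statement) =====
-- stated objective: alternative
-- what changed: Replaced the index-based outer loop with a nested inner collection loop by a single flat fold over the lines driven by an outside/inside-block state machine that buffers the current deploy block and flushes it when a de-denting line or end of input is reached.
import Mathlib
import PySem

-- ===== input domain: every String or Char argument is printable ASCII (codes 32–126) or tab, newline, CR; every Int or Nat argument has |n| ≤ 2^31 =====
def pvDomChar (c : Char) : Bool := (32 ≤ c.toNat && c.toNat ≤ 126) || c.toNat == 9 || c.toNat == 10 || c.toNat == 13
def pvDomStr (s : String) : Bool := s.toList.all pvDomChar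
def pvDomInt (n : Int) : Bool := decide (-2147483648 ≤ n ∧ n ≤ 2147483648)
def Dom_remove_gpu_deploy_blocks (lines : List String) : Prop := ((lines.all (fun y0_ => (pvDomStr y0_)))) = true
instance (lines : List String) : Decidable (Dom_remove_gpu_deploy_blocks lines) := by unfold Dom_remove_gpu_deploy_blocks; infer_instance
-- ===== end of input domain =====

-- B replaces A's outer index loop with nested block-collection loop by one flat fold with an
-- outside/inside state machine (alternative decomposition, same cost); return values proved equal.

-- ===== PORT A =====
-- inner `while j < n` loop of A: returns (block tail collected, remaining lines)
def pvAcollect (deploy_indent : Int) : List String → List String × List String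
  | [] => ([], [])
  | next_line :: rest =>
    let next_stripped := PySem.Str.strip next_line
    let next_indent : Int := PySem.Str.len next_line - PySem.Str.len (PySem.Str.lstrip next_line)
    if (next_stripped != "") && !PySem.Str.startswith next_stripped "#" && decide (next_indent ≤ deploy_indent) then
      ([], next_line :: rest)
    else
      let p := pvAcollect deploy_indent rest
      (next_line :: p.1, p.2)

theorem pvAcollect_len (deploy_indent : Int) (xs : List String) :
    (pvAcollect deploy_indent xs).2.length ≤ xs.length := by
  induction xs with
  | nil => simp [pvAcollect]
  | cons x xs ih =>
    simp only [pvAcollect]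
    split
    · simp
    · simpa using Nat.le_succ_of_le ih

-- outer `while i < n` loop of A, with `result` as accumulator
def pvAgo (result : List String) : List String → List String
  | [] => result
  | line :: rest =>
    let stripped := PySem.Str.strip line
    if PySem.Str.startswith stripped "#" && PySem.Str.isIn "Uncomment for GPU support" stripped then
      pvAgo result rest
    else if PySem.Str.startswith stripped "deploy:" then
      let deploy_indent : Int := PySem.Str.len line - PySem.Str.len (PySem.Str.lstrip line)
      let p := pvAcollect deploy_indent rest
      let block_lines := line :: p.1
      let block_text := PySem.Str.join "" block_lines
      if PySem.Str.isIn "capabilities" block_text && PySem.Str.isIn "gpu" block_text then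
        pvAgo result p.2
      else
        pvAgo (result ++ block_lines) p.2
    else
      pvAgo (result ++ [line]) rest
termination_by remaining => remaining.length
decreasing_by
  all_goals first
    | exact Nat.lt_succ_of_le (pvAcollect_len _ _)
    | (simp; try omega)

def remove_gpu_deploy_blocks (lines : List String) : List String := pvAgo [] lines

-- ===== PORT B =====
-- flush: drop the buffered block if it references GPU capabilities, else keep it
def pvBflush (result : List String) (buf : List String) : List String :=
  let text := PySem.Str.join "" buf
  if PySem.Str.isIn "capabilities" text && PySem.Str.isIn "gpu" text then result
  else result ++ buf

-- process one line in outside mode; returns (result, new state)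
def pvBoutside (result : List String) (line : String) : List String × Option (Int × List String) :=
  let stripped := PySem.Str.strip line
  if PySem.Str.startswith stripped "#" && PySem.Str.isIn "Uncomment for GPU support" stripped then
    (result, none)
  else if PySem.Str.startswith stripped "deploy:" then
    (result, some (PySem.Str.len line - PySem.Str.len (PySem.Str.lstrip line), [line]))
  else
    (result ++ [line], none)

def pvBstep (st : List String × Option (Int × List String)) (line : String) :
    List String × Option (Int × List String) :=
  match st with
  | (result, none) => pvBoutside result line
  | (result, some (indent0, buf)) =>
    let stripped := PySem.Str.strip line
    if (stripped != "") && !PySem.Str.startswith stripped "#" &&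
        decide ((PySem.Str.len line - PySem.Str.len (PySem.Str.lstrip line) : Int) ≤ indent0) then
      pvBoutside (pvBflush result buf) line
    else
      (result, some (indent0, buf ++ [line]))

def remove_gpu_deploy_blocks_alt (lines : List String) : List String :=
  match lines.foldl pvBstep ([], none) with
  | (result, none) => result
  | (result, some (_, buf)) => pvBflush result buf

-- ===== PRECONDITION & SPEC =====
def Spec_remove_gpu_deploy_blocks (lines : List String) (out : List String) : Prop := out = remove_gpu_deploy_blocks_alt lines
instance (lines : List String) (out : List String) : Decidable (Spec_remove_gpu_deploy_blocks lines out) := by unfold Spec_remove_gpu_deploy_blocks; infer_instance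

-- ===== CLAIM (what is proved, stated in full; the proofs are below) =====
def Claim_equal_remove_gpu_deploy_blocks : Prop := ∀ (lines : List String), Dom_remove_gpu_deploy_blocks lines → Spec_remove_gpu_deploy_blocks lines (remove_gpu_deploy_blocks lines)

-- ===== LEMMAS AND PROOFS =====

-- finish B's fold state: flush a pending buffer
def pvFin (st : List String × Option (Int × List String)) : List String :=
  match st with
  | (result, none) => result
  | (result, some (_, buf)) => pvBflush result buf

-- running B's fold from inside-mode until the block ends equals collecting with A's inner loop
theorem pvInsideRun (ind : Int) (xs : List String) : ∀ (res buf : List String),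
    pvFin (List.foldl pvBstep (res, some (ind, buf)) xs)
      = pvFin (List.foldl pvBstep (pvBflush res (buf ++ (pvAcollect ind xs).1), none) (pvAcollect ind xs).2) := by
  induction xs with
  | nil => intro res buf; simp [pvAcollect, pvFin]
  | cons x xs ih =>
    intro res buf
    simp only [pvAcollect, List.foldl_cons, pvBstep]
    by_cases h : ((PySem.Str.strip x != "") && !PySem.Str.startswith (PySem.Str.strip x) "#" &&
        decide ((PySem.Str.len x - PySem.Str.len (PySem.Str.lstrip x) : Int) ≤ ind)) = true
    · simp only [if_pos h]
      simp [List.foldl_cons, pvBstep]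
    · simp only [if_neg h]
      rw [ih res (buf ++ [x])]
      simp [List.append_assoc]

-- main invariant: B's fold from outside-mode computes A's outer loop
theorem pvMain : ∀ (n : Nat) (xs : List String) (res : List String), xs.length ≤ n →
    pvFin (List.foldl pvBstep (res, none) xs) = pvAgo res xs := by
  intro n
  induction n with
  | zero =>
    intro xs res h
    have : xs = [] := List.eq_nil_of_length_eq_zero (Nat.le_zero.mp h)
    subst this; simp [pvAgo, pvFin]
  | succ n ih =>
    intro xs res h
    cases xs with
    | nil => simp [pvAgo, pvFin]
    | cons line rest =>
      simp only [List.foldl_cons, pvBstep, pvBoutside]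
      rw [pvAgo]
      by_cases h1 : (PySem.Str.startswith (PySem.Str.strip line) "#" &&
          PySem.Str.isIn "Uncomment for GPU support" (PySem.Str.strip line)) = true
      · simp only [if_pos h1]
        exact ih rest res (Nat.le_of_succ_le_succ h)
      · simp only [if_neg h1]
        by_cases h2 : PySem.Str.startswith (PySem.Str.strip line) "deploy:" = true
        · simp only [if_pos h2]
          rw [pvInsideRun]
          have hlen : (pvAcollect (PySem.Str.len line - PySem.Str.len (PySem.Str.lstrip line)) rest).2.length ≤ n :=
            le_trans (pvAcollect_len _ _) (Nat.le_of_succ_le_succ h)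
          simp only [pvBflush, List.singleton_append]
          split
          · exact ih _ res hlen
          · exact ih _ _ hlen
        · simp only [if_neg h2]
          exact ih rest (res ++ [line]) (Nat.le_of_succ_le_succ h)

-- ===== VERDICT (by name: the statement is the Claim_ definition above) =====
theorem remove_gpu_deploy_blocks_spec : Claim_equal_remove_gpu_deploy_blocks := by
  intro lines _
  unfold Spec_remove_gpu_deploy_blocks remove_gpu_deploy_blocks remove_gpu_deploy_blocks_alt
  have := pvMain lines.length lines [] le_rfl
  rw [← this]
  rfl
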